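-- pv_equiv track=rewrite | github.com/jane264/universal_scraper | core/utils.py | content_score
-- ===== SOURCE A (Python) =====
-- def content_score(data):
--     texts = [
--         d.get("text", "").strip()
--         for d in data
--         if d.get("text")
--     ]
--
--     long_text = sum(len(t) for t in texts if len(t) > 40)
--     unique_text = len(set(texts))
--     list_items = sum(1 for d in data if d.get("tag") == "li")
--     images = sum(1 for d in data if d.get("src"))
--
--     return (
--         long_text +
--         unique_text * 50 +
--         list_items * 30 +
--         images * 10
--     )
-- ===== SOURCE B (Python) =====
-- def content_score(data):
--     # One pass builds a frequency dict of stripped texts (replacing A's texts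
--     # list + set) and the tag/src extras; long_text is then derived from the
--     # distinct texts weighted by their multiplicities.
--     freq = {}
--     extras = 0
--     for d in data:
--         text = d.get("text")
--         if text:
--             t = text.strip()
--             freq[t] = freq.get(t, 0) + 1
--         if d.get("tag") == "li":
--             extras += 30
--         if d.get("src"):
--             extras += 10
--     score = extras + 50 * len(freq)
--     for t, c in freq.items():
--         n = len(t)
--         if n > 40:
--             score += n * c
--     return score
-- ===== Notes on version B (the rewrite author's own statement) =====
-- stated objective: alternative
-- what changed: B replaces A's texts list, set and four independent passes by a frequency dictionary of stripped texts built in one pass (with the tag/src extras), then derives long_text from the distinct texts weighted by their multiplicities.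
import Mathlib
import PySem

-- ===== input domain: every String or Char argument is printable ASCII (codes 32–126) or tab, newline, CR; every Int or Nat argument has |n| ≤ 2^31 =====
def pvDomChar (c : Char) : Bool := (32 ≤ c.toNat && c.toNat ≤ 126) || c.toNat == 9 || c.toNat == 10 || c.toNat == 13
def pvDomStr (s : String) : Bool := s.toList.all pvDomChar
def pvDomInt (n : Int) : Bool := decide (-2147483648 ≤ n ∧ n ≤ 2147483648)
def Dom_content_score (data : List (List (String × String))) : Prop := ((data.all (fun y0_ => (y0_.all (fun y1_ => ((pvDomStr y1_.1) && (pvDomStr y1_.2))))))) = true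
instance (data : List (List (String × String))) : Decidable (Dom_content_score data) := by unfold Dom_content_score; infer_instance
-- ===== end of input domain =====

-- B replaces A's texts list + set with a frequency dict of stripped texts built in one pass; long_text is derived from the distinct texts weighted by multiplicity. Same cost.

-- d.get(k) on an association-list dict: first matching key
def dget (d : List (String × String)) (k : String) : Option String :=
  (d.find? (fun p => p.1 == k)).map (·.2)

-- Python truthiness of d.get(k): present and non-empty
def optTruthy (o : Option String) : Bool :=
  match o with
  | some s => s != ""
  | none => false

-- ===== PORT A =====
def content_score (data : List (List (String × String))) : Int :=
  let texts := (data.filter (fun d => optTruthy (dget d "text"))).map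
      (fun d => PySem.Str.strip ((dget d "text").getD ""))
  let long_text := ((texts.filter (fun t => 40 < PySem.Str.len t)).map PySem.Str.len).sum
  let unique_text : Int := (PySem.Set.ofList texts).length
  let list_items : Int := data.countP (fun d => dget d "tag" == some "li")
  let images : Int := data.countP (fun d => optTruthy (dget d "src"))
  long_text + unique_text * 50 + list_items * 30 + images * 10

-- ===== PORT B =====
-- one element of B's first loop: update the frequency dict and the extras
def bStep (s : PySem.Dict String Int × Int) (d : List (String × String)) :
    PySem.Dict String Int × Int :=
  let fd :=
    match dget d "text" with
    | some tx =>
        if tx != "" then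
          let t := PySem.Str.strip tx
          s.1.insert t (s.1.getD t 0 + 1)
        else s.1
    | none => s.1
  let e1 := if dget d "tag" == some "li" then s.2 + 30 else s.2
  let e2 := if optTruthy (dget d "src") then e1 + 10 else e1
  (fd, e2)

def content_score_alt (data : List (List (String × String))) : Int :=
  let s := data.foldl bStep (PySem.Dict.empty, 0)
  let base := s.2 + 50 * (s.1.size : Int)
  s.1.items.foldl
    (fun acc p => if 40 < PySem.Str.len p.1 then acc + PySem.Str.len p.1 * p.2 else acc)
    base

-- ===== PRECONDITION & SPEC =====
def Spec_content_score (data : List (List (String × String))) (out : Int) : Prop := out = content_score_alt data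
instance (data : List (List (String × String))) (out : Int) : Decidable (Spec_content_score data out) := by unfold Spec_content_score; infer_instance

-- ===== CLAIM (what is proved, stated in full; the proofs are below) =====
def Claim_equal_content_score : Prop := ∀ (data : List (List (String × String))), Dom_content_score data → Spec_content_score data (content_score data)

-- ===== LEMMAS AND PROOFS =====

-- A's texts comprehension
def csTexts (data : List (List (String × String))) : List String :=
  (data.filter (fun d => optTruthy (dget d "text"))).map
    (fun d => PySem.Str.strip ((dget d "text").getD ""))

lemma csTexts_cons_pos (d : List (String × String)) (rest : List (List (String × String)))
    (tx : String) (htx : dget d "text" = some tx) (hne : tx ≠ "") :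
    csTexts (d :: rest) = PySem.Str.strip tx :: csTexts rest := by
  simp [csTexts, optTruthy, htx, hne]

lemma csTexts_cons_neg (d : List (String × String)) (rest : List (List (String × String)))
    (h : optTruthy (dget d "text") = false) :
    csTexts (d :: rest) = csTexts rest := by
  simp [csTexts, h]

-- B's first loop = a counter of A's texts plus the weighted tag/src counts
lemma bStep_inv (data : List (List (String × String))) (fd : PySem.Dict String Int) (e : Int) :
    data.foldl bStep (fd, e) =
      ((csTexts data).foldl (fun d x => d.insert x (d.getD x 0 + 1)) fd,
       e + (data.countP (fun d => dget d "tag" == some "li") : Int) * 30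
         + (data.countP (fun d => optTruthy (dget d "src")) : Int) * 10) := by
  induction data generalizing fd e with
  | nil => simp [csTexts]
  | cons d rest ih =>
      have hsplit : List.foldl bStep (bStep (fd, e) d) rest =
          List.foldl bStep ((bStep (fd, e) d).1, (bStep (fd, e) d).2) rest := rfl
      simp only [List.foldl_cons, List.countP_cons, hsplit, ih]
      refine Prod.ext ?_ ?_
      · cases htx : dget d "text" with
        | none =>
            rw [csTexts_cons_neg d rest (by simp [optTruthy, htx])]
            simp [bStep, htx]
        | some tx =>
            by_cases hne : tx = ""
            · rw [csTexts_cons_neg d rest (by simp [optTruthy, htx, hne])]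
              simp [bStep, htx, hne]
            · rw [csTexts_cons_pos d rest tx htx hne]
              have : (bStep (fd, e) d).1 =
                  fd.insert (PySem.Str.strip tx) (fd.getD (PySem.Str.strip tx) 0 + 1) := by
                simp [bStep, htx, hne]
              rw [this]; rfl
      · have : (bStep (fd, e) d).2 =
            (if optTruthy (dget d "src")
             then (if dget d "tag" == some "li" then e + 30 else e) + 10
             else (if dget d "tag" == some "li" then e + 30 else e)) := rfl
        rw [this]; split_ifs <;> simp_all <;> ring

-- Σ over the distinct elements of g·count = Σ over the list of g
lemma sum_ite_single (g : String → Int) (x : String) :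
    ∀ (S : List String), S.Nodup → x ∈ S →
      (S.map (fun k => if k = x then g k else 0)).sum = g x := by
  intro S
  induction S with
  | nil => simp
  | cons y S ih =>
      intro hnd hx
      rcases List.mem_cons.mp hx with h | h
      · subst h
        have hz : (S.map (fun k => if k = x then g k else 0)).sum = 0 := by
          apply List.sum_eq_zero
          intro z hz
          rcases List.mem_map.mp hz with ⟨k, hk, hkz⟩
          have hkx : k ≠ x := fun h' => (List.nodup_cons.mp hnd).1 (h' ▸ hk)
          simpa [hkx] using hkz.symm
        simp [hz]
      · have hyx : y ≠ x := fun h' => (List.nodup_cons.mp hnd).1 (h' ▸ h)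
        simp only [List.map_cons, List.sum_cons, if_neg hyx,
          ih (List.nodup_cons.mp hnd).2 h]
        ring

lemma sum_g_count (g : String → Int) :
    ∀ (l S : List String), S.Nodup → (∀ x ∈ l, x ∈ S) →
      (S.map (fun k => g k * (l.count k : Int))).sum = (l.map g).sum := by
  intro l
  induction l with
  | nil => intro S _ _; simp
  | cons x l ih =>
      intro S hnd hsub
      have h1 : (S.map (fun k => g k * (((x :: l).count k : Nat) : Int))).sum =
          (S.map (fun k => g k * (l.count k : Int))).sum +
          (S.map (fun k => if k = x then g k else 0)).sum := by
        rw [← List.sum_map_add]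
        apply congrArg List.sum
        apply List.map_congr_left
        intro k _
        by_cases hk : k = x
        · subst hk
          rw [List.count_cons, if_pos rfl]
          simp only [beq_self_eq_true, if_true]
          push_cast; ring
        · rw [List.count_cons, if_neg hk,
            if_neg (fun h : (x == k) = true => hk (beq_iff_eq.mp h).symm)]
          push_cast; ring
      rw [h1, sum_ite_single g x S hnd (hsub x (List.mem_cons_self ..)),
        ih S hnd (fun y hy => hsub y (List.mem_cons_of_mem _ hy))]
      simp only [List.map_cons, List.sum_cons]
      ring

-- A's long-text sum as a Σ of an ite
lemma csLong_eq_sum (texts : List String) :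
    ((texts.filter (fun t => 40 < PySem.Str.len t)).map PySem.Str.len).sum =
      (texts.map (fun t => if 40 < PySem.Str.len t then PySem.Str.len t else 0)).sum := by
  induction texts with
  | nil => rfl
  | cons t ts ih =>
      simp only [List.filter_cons, List.map_cons, List.sum_cons]
      split <;> simp_all

-- B's second loop as base + Σ
lemma foldl_if_add :
    ∀ (l : List (String × Int)) (a : Int),
      l.foldl (fun acc p => if 40 < PySem.Str.len p.1 then acc + PySem.Str.len p.1 * p.2 else acc) a =
        a + (l.map (fun p => if 40 < PySem.Str.len p.1 then PySem.Str.len p.1 * p.2 else 0)).sum := by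
  intro l
  induction l with
  | nil => simp
  | cons p l ih =>
      intro a
      simp only [List.foldl_cons, List.map_cons, List.sum_cons, ih]
      split <;> ring

-- the two ports, written without their let-bindings (definitional)
lemma content_score_eq (data : List (List (String × String))) :
    content_score data =
      (((csTexts data).filter (fun t => 40 < PySem.Str.len t)).map PySem.Str.len).sum +
      ((PySem.Set.ofList (csTexts data)).length : Int) * 50 +
      ((data.countP (fun d => dget d "tag" == some "li") : Nat) : Int) * 30 +
      ((data.countP (fun d => optTruthy (dget d "src")) : Nat) : Int) * 10 := rfl

lemma content_score_alt_eq (data : List (List (String × String))) :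
    content_score_alt data =
      (data.foldl bStep (PySem.Dict.empty, 0)).1.items.foldl
        (fun acc p => if 40 < PySem.Str.len p.1 then acc + PySem.Str.len p.1 * p.2 else acc)
        ((data.foldl bStep (PySem.Dict.empty, 0)).2 +
          50 * ((data.foldl bStep (PySem.Dict.empty, 0)).1.size : Int)) := rfl

-- ===== VERDICT (by name: the statement is the Claim_ definition above) =====
theorem content_score_spec : Claim_equal_content_score := by
  intro data _
  unfold Spec_content_score
  rw [content_score_eq, content_score_alt_eq, bStep_inv data PySem.Dict.empty 0]
  simp only [PySem.Dict.foldl_insert_getD_add_one_eq_counter]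
  rw [foldl_if_add]
  have hsize : ((PySem.Dict.counter (csTexts data)).size : Int) =
      ((PySem.Set.ofList (csTexts data)).length : Int) := by
    simp [PySem.Dict.size, PySem.Dict.items_counter]
  have hsum : (((PySem.Dict.counter (csTexts data)).items).map
        (fun p => if 40 < PySem.Str.len p.1 then PySem.Str.len p.1 * p.2 else 0)).sum =
      ((csTexts data).map (fun t => if 40 < PySem.Str.len t then PySem.Str.len t else 0)).sum := by
    rw [PySem.Dict.items_counter, List.map_map]
    have heq : ((fun p : String × Int => if 40 < PySem.Str.len p.1 then PySem.Str.len p.1 * p.2 else 0) ∘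
          (fun k => (k, ((csTexts data).count k : Int)))) =
        (fun k => (if 40 < PySem.Str.len k then PySem.Str.len k else 0) * ((csTexts data).count k : Int)) := by
      funext k
      simp only [Function.comp_apply]
      by_cases h : 40 < PySem.Str.len k
      · rw [if_pos h, if_pos h]
      · rw [if_neg h, if_neg h]; ring
    rw [heq]
    exact sum_g_count _ (csTexts data) _ (PySem.Set.nodup_ofList _)
      (fun x hx => (PySem.Set.mem_ofList ..).mpr hx)
  rw [hsum, hsize, ← csLong_eq_sum]
  ring
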